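-- pv_equiv track=rewrite | github.com/K9A2/qperf | python/har_converter.py | get_request_mapping
-- ===== SOURCE A (Python) =====
-- def get_request_mapping(filtered_entries):
--   """
--   获取不重复的 request 列表，用于映射请求 url 和资源 id
--
--   :param filtered_entries: 包含所有请求的日志记录，其中的 request 可能会有重复
--   :return: request 与资源 id 的映射关系
--   """
--   request_mapping = {}
--   resource_id = 0
--   for entry in filtered_entries:
--     # 提取请求 url
--     request_url = entry['request_url']
--     if request_url not in request_mapping:
--       # 把该请求 url 添加到映射中
--       request_mapping[request_url] = resource_id
--       resource_id += 1
--   return request_mapping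
-- ===== SOURCE B (Python) =====
-- def get_request_mapping(filtered_entries):
--   """
--   获取不重复的 request 列表，用于映射请求 url 和资源 id
--
--   :param filtered_entries: 包含所有请求的日志记录，其中的 request 可能会有重复
--   :return: request 与资源 id 的映射关系
--   """
--   urls = [entry['request_url'] for entry in filtered_entries]
--   # a url's resource id is the number of distinct urls strictly before its first occurrence
--   return {url: len(set(urls[:i]))
--           for i, url in enumerate(urls) if url not in urls[:i]}
-- ===== Notes on version B (the rewrite author's own statement) =====
-- stated objective: alternative
-- what changed: Replaced A's single streaming pass with a dict membership test and a running counter by a stateless per-position characterization: extract the url list, then a filtered dict comprehension over enumerate keeps each first occurrence (url not in urls[:i]) and computes its id directly as len(set(urls[:i])), the count of distinct earlier urls.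
import Mathlib
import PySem

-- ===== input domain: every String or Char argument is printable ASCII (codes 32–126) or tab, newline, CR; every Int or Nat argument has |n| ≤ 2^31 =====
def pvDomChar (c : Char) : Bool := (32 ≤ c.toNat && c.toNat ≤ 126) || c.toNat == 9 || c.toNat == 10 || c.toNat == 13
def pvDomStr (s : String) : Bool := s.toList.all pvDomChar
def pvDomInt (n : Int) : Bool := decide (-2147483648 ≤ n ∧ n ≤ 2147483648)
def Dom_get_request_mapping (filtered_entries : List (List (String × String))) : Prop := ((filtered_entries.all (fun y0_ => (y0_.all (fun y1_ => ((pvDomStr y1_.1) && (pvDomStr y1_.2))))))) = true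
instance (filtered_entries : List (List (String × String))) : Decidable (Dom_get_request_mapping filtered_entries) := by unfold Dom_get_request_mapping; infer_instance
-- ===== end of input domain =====

-- B replaces A's streaming membership-test-plus-counter loop by a per-position characterization: a url's id is the count of distinct urls in the prefix before its first occurrence (quadratic, no running state); objective: alternative, same results.


-- ===== PORT A =====
-- A: one pass; dict request_mapping and counter resource_id; add url ↦ id on first sight.
def get_request_mapping (filtered_entries : List (List (String × String))) : List (String × Int) :=
  (filtered_entries.foldl
    (fun (st : PySem.Dict String Int × Int) entry =>
      let request_url := (PySem.Dict.mk entry).getD "request_url" ""   -- entry['request_url']; Pre_ guarantees the key is present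
      if st.1.contains request_url then st
      else (st.1.insert request_url st.2, st.2 + 1))
    (PySem.Dict.empty, 0)).1.items

-- ===== PORT B =====
-- B: extract the urls, then a dict comprehension over enumerate: keep index i's url iff it is a
-- first occurrence (url not in urls[:i]) and give it id len(set(urls[:i])). No running counter.
def get_request_mapping_alt (filtered_entries : List (List (String × String))) : List (String × Int) :=
  let urls := filtered_entries.map (fun entry => (PySem.Dict.mk entry).getD "request_url" "")
  ((PySem.List.enumerate urls).foldl
    (fun (d : PySem.Dict String Int) p =>
      if p.2 ∈ PySem.List.slice urls none (some p.1) then d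
      else d.insert p.2 ((PySem.Set.ofList (PySem.List.slice urls none (some p.1))).length : Int))
    PySem.Dict.empty).items

-- ===== PRECONDITION & SPEC =====
-- Pre_ excludes exactly the entries missing the key 'request_url', on which Python's entry['request_url'] raises KeyError (in A and in B alike).
def Pre_get_request_mapping (filtered_entries : List (List (String × String))) : Prop :=
  ∀ entry ∈ filtered_entries, (PySem.Dict.mk entry).contains "request_url" = true
instance (filtered_entries : List (List (String × String))) : Decidable (Pre_get_request_mapping filtered_entries) := by unfold Pre_get_request_mapping; infer_instance
def pvWitness_get_request_mapping : (List (List (String × String))) :=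
  [[("request_url", "a")], [("request_url", "b")], [("request_url", "a")]]

def Spec_get_request_mapping (filtered_entries : List (List (String × String))) (out : List (String × Int)) : Prop := out = get_request_mapping_alt filtered_entries
instance (filtered_entries : List (List (String × String))) (out : List (String × Int)) : Decidable (Spec_get_request_mapping filtered_entries out) := by unfold Spec_get_request_mapping; infer_instance

-- ===== CLAIM (what is proved, stated in full; the proofs are below) =====
def Claim_equal_get_request_mapping : Prop := ∀ (filtered_entries : List (List (String × String))), Dom_get_request_mapping filtered_entries → Pre_get_request_mapping filtered_entries → Spec_get_request_mapping filtered_entries (get_request_mapping filtered_entries)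

-- ===== LEMMAS AND PROOFS =====

-- The A-loop state reached after having seen exactly the (distinct, in-order) urls s.
def pvStOf (s : List String) : PySem.Dict String Int × Int :=
  (PySem.Dict.mk ((PySem.List.enumerate s).map (fun p => (p.2, p.1))), (s.length : Int))

lemma pvStOf_keys (s : List String) : (pvStOf s).1.keys = s := by
  simp [pvStOf, PySem.Dict.keys_mk, List.map_map, Function.comp_def,
        PySem.List.map_snd_enumerate]

lemma pvStep_stOf (s : List String) (u : String) :
    (if (pvStOf s).1.contains u then pvStOf s
     else ((pvStOf s).1.insert u (pvStOf s).2, (pvStOf s).2 + 1)) = pvStOf (PySem.Set.add s u) := by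
  by_cases hm : u ∈ s
  · rw [PySem.Dict.contains_eq_decide_mem_keys, pvStOf_keys]
    simp [hm]
  · rw [PySem.Dict.contains_eq_decide_mem_keys, pvStOf_keys]
    simp only [hm, decide_false, if_neg Bool.false_ne_true]
    have hc : (pvStOf s).1.contains u = false := by
      rw [PySem.Dict.contains_eq_decide_mem_keys, pvStOf_keys]; simp [hm]
    rw [PySem.Set.add_of_not_mem hm]
    refine Prod.ext ?_ ?_
    · apply PySem.Dict.ext
      rw [PySem.Dict.items_insert_of_not_contains _ _ hc]
      simp [pvStOf, PySem.List.enumerate_append]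
    · simp [pvStOf]

-- A's loop, started after the distinct urls s, lands on the state for s updated by the remaining urls.
lemma pvFoldA (entries : List (List (String × String))) : ∀ (s : List String), s.Nodup →
    (entries.foldl
      (fun (st : PySem.Dict String Int × Int) entry =>
        let request_url := (PySem.Dict.mk entry).getD "request_url" ""
        if st.1.contains request_url then st
        else (st.1.insert request_url st.2, st.2 + 1))
      (pvStOf s))
    = pvStOf (PySem.Set.update s
        (entries.map (fun entry => (PySem.Dict.mk entry).getD "request_url" ""))) := by
  induction entries with
  | nil => intro s _; simp [PySem.Set.update]
  | cons e rest ih =>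
    intro s hs
    rw [List.map_cons, PySem.Set.update_cons, List.foldl_cons]
    show (rest.foldl _ (if (pvStOf s).1.contains ((PySem.Dict.mk e).getD "request_url" "") then pvStOf s
      else ((pvStOf s).1.insert ((PySem.Dict.mk e).getD "request_url" "") (pvStOf s).2, (pvStOf s).2 + 1))) = _
    rw [pvStep_stOf s _]
    exact ih _ (PySem.Set.nodup_add s _ hs)

-- B's comprehension over enumerate builds exactly the dict component of A's final state.
lemma pvFoldB (urls : List String) :
    ((PySem.List.enumerate urls).foldl
      (fun (d : PySem.Dict String Int) p =>
        if p.2 ∈ PySem.List.slice urls none (some p.1) then d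
        else d.insert p.2 ((PySem.Set.ofList (PySem.List.slice urls none (some p.1))).length : Int))
      PySem.Dict.empty)
    = (pvStOf (PySem.Set.ofList urls)).1 := by
  induction urls using List.reverseRecOn with
  | nil => rfl
  | append_singleton init u ih =>
    rw [PySem.List.enumerate_append]
    have he : PySem.List.enumerate [u] (0 + (init.length : Int)) = [((init.length : Int), u)] := by
      simp [PySem.List.enumerate]
    rw [he, List.foldl_append]
    have hc : (PySem.List.enumerate init).foldl
        (fun (d : PySem.Dict String Int) p =>
          if p.2 ∈ PySem.List.slice (init ++ [u]) none (some p.1) then d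
          else d.insert p.2 ((PySem.Set.ofList (PySem.List.slice (init ++ [u]) none (some p.1))).length : Int))
        PySem.Dict.empty
        = (PySem.List.enumerate init).foldl
        (fun (d : PySem.Dict String Int) p =>
          if p.2 ∈ PySem.List.slice init none (some p.1) then d
          else d.insert p.2 ((PySem.Set.ofList (PySem.List.slice init none (some p.1))).length : Int))
        PySem.Dict.empty := by
      apply PySem.List.foldl_congr_mem
      intro acc p hp
      rcases (PySem.List.mem_enumerate_iff init 0 p).1 hp with ⟨k, hk, rfl⟩
      simp only [zero_add]
      rw [PySem.List.slice_to_natCast, PySem.List.slice_to_natCast,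
          List.take_append_of_le_length (le_of_lt hk)]
    rw [hc, ih]
    simp only [List.foldl_cons, List.foldl_nil]
    rw [PySem.List.slice_to_natCast, List.take_left, PySem.Set.ofList_append_singleton]
    by_cases hm : u ∈ init
    · have hmem : u ∈ PySem.Set.ofList init := by simp [PySem.Set.mem_ofList, hm]
      rw [if_pos hm, PySem.Set.add_of_mem hmem]
    · have hms : u ∉ PySem.Set.ofList init := by simp [PySem.Set.mem_ofList, hm]
      rw [if_neg hm]
      have h := congrArg Prod.fst (pvStep_stOf (PySem.Set.ofList init) u)
      have hcf : (pvStOf (PySem.Set.ofList init)).1.contains u = false := by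
        rw [PySem.Dict.contains_eq_decide_mem_keys, pvStOf_keys]; simp [hms]
      rw [if_neg (by rw [hcf]; exact Bool.false_ne_true)] at h
      exact h

-- ===== VERDICT (by name: the statement is the Claim_ definition above) =====
theorem get_request_mapping_spec : Claim_equal_get_request_mapping := by
  intro fe _ _
  show get_request_mapping fe = get_request_mapping_alt fe
  simp only [get_request_mapping, get_request_mapping_alt]
  rw [pvFoldB, show (PySem.Dict.empty, (0 : Int)) = pvStOf [] from rfl,
     pvFoldA fe [] List.nodup_nil, PySem.Set.update_nil_left]
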